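-- pv_equiv track=rewrite | github.com/sukria/koan | koan/app/systemd_service.py | build_safe_path
-- ===== SOURCE A (Python) =====
-- ESSENTIAL_DIRS = [
--     "/usr/local/sbin",
--     "/usr/local/bin",
--     "/usr/sbin",
--     "/usr/bin",
--     "/sbin",
--     "/bin",
-- ]
--
-- def build_safe_path(raw_path: str, home_dir: str) -> str:
--     """Build a sanitized PATH for systemd services.
--
--     Filters out home-directory entries for security, ensures essential
--     system directories are present, and deduplicates while preserving order.
--     """
--     home = home_dir.rstrip("/")
--     seen = set()
--     result = []
--
--     for entry in raw_path.split(":"):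
--         entry = entry.strip()
--         if not entry:
--             continue
--         if entry == home or entry.startswith(home + "/"):
--             continue
--         if entry not in seen:
--             seen.add(entry)
--             result.append(entry)
--
--     for d in ESSENTIAL_DIRS:
--         if d not in seen:
--             seen.add(d)
--             result.append(d)
--
--     return ":".join(result)
-- ===== SOURCE B (Python) =====
-- ESSENTIAL_DIRS = [
--     "/usr/local/sbin",
--     "/usr/local/bin",
--     "/usr/sbin",
--     "/usr/bin",
--     "/sbin",
--     "/bin",
-- ]
--
-- def build_safe_path(raw_path: str, home_dir: str) -> str:
--     """No seen-set: after a filter stage, deduplicate by repeatedly emitting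
--     the head of the candidate list and deleting all its later occurrences."""
--     home = home_dir.rstrip("/")
--     cands = [
--         e
--         for e in (p.strip() for p in raw_path.split(":"))
--         if e and e != home and not e.startswith(home + "/")
--     ] + ESSENTIAL_DIRS
--     out = []
--     while cands:
--         head = cands[0]
--         out.append(head)
--         cands = [x for x in cands[1:] if x != head]
--     return ":".join(out)
-- ===== Notes on version B (the rewrite author's own statement) =====
-- stated objective: alternative
-- what changed: Drops A's seen-set/result bookkeeping entirely: B filters the raw entries, appends ESSENTIAL_DIRS, then deduplicates by repeatedly emitting the head of the candidate list and filtering all its later occurrences out of the tail.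
import Mathlib
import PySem

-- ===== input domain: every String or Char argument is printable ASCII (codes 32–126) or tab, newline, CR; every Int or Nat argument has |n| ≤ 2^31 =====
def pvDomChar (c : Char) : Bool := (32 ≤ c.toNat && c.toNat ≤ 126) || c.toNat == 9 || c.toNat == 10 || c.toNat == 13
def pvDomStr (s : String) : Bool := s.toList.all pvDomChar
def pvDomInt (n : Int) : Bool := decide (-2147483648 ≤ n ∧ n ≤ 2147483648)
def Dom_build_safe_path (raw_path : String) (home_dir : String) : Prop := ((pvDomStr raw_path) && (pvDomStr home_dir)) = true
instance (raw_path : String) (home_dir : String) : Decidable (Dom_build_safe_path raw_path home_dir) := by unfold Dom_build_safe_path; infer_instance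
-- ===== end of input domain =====

-- B drops A's seen-set: a filter stage, then dedup by repeatedly emitting the
-- head and deleting its later occurrences from the tail (objective: alternative).


-- ===== PORT A =====
-- module constant shared by both Pythons
def ESSENTIAL_DIRS : List String :=
  ["/usr/local/sbin", "/usr/local/bin", "/usr/sbin", "/usr/bin", "/sbin", "/bin"]

-- exact port of home_dir.rstrip("/"): drop trailing '/' characters
def pvRstripSlash (s : String) : String :=
  String.ofList ((s.toList.reverse.dropWhile (fun c => c == '/')).reverse)

def build_safe_path (raw_path : String) (home_dir : String) : String :=
  let home := pvRstripSlash home_dir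
  let st :=
    ((PySem.Str.split? raw_path ":").getD []).foldl
      (fun (st : PySem.Set String × List String) p =>
        let entry := PySem.Str.strip p
        if entry == "" then st
        else if entry == home || PySem.Str.startswith entry (home ++ "/") then st
        else if PySem.Set.contains st.1 entry then st
        else (PySem.Set.add st.1 entry, st.2 ++ [entry]))
      (PySem.Set.empty, [])
  let st2 :=
    ESSENTIAL_DIRS.foldl
      (fun (st : PySem.Set String × List String) d =>
        if PySem.Set.contains st.1 d then st
        else (PySem.Set.add st.1 d, st.2 ++ [d]))
      st
  PySem.Str.join ":" st2.2

-- ===== PORT B =====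
-- B's while loop: emit the head, delete its later occurrences by filtering.
def pvNub (l : List String) : List String :=
  match l with
  | [] => []
  | x :: xs => x :: pvNub (xs.filter (fun y => y ≠ x))
  termination_by l.length
  decreasing_by simp only [List.length_cons, List.length_unattach]; exact Nat.lt_succ_of_le ((List.length_filter_le _ _).trans (le_of_eq List.length_attach))

def build_safe_path_alt (raw_path : String) (home_dir : String) : String :=
  let home := pvRstripSlash home_dir
  let cands :=
    ((((PySem.Str.split? raw_path ":").getD []).map PySem.Str.strip).filter
      (fun e => !(e == "") && !(e == home) && !(PySem.Str.startswith e (home ++ "/"))))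
    ++ ESSENTIAL_DIRS
  PySem.Str.join ":" (pvNub cands)

-- ===== PRECONDITION & SPEC =====
def Spec_build_safe_path (raw_path : String) (home_dir : String) (out : String) : Prop := out = build_safe_path_alt raw_path home_dir
instance (raw_path : String) (home_dir : String) (out : String) : Decidable (Spec_build_safe_path raw_path home_dir out) := by unfold Spec_build_safe_path; infer_instance

-- ===== CLAIM (what is proved, stated in full; the proofs are below) =====
def Claim_equal_build_safe_path : Prop := ∀ (raw_path : String) (home_dir : String), Dom_build_safe_path raw_path home_dir → Spec_build_safe_path raw_path home_dir (build_safe_path raw_path home_dir)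

-- ===== LEMMAS AND PROOFS =====

-- A's first loop, started on a duplicated state (s, s), filters and then acts
-- exactly like PySem.Set.add on both components.
theorem loopA_eq (home : String) (ps : List String) (s : PySem.Set String) :
    ps.foldl
      (fun (st : PySem.Set String × List String) p =>
        let entry := PySem.Str.strip p
        if entry == "" then st
        else if entry == home || PySem.Str.startswith entry (home ++ "/") then st
        else if PySem.Set.contains st.1 entry then st
        else (PySem.Set.add st.1 entry, st.2 ++ [entry]))
      (s, s)
    = (let t := ((ps.map PySem.Str.strip).filter
          (fun e => !(e == "") && !(e == home) && !(PySem.Str.startswith e (home ++ "/")))).foldl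
          PySem.Set.add s
       (t, t)) := by
  induction ps generalizing s with
  | nil => simp
  | cons p ps ih =>
    simp only [List.foldl_cons, List.map_cons, List.filter_cons]
    by_cases h1 : PySem.Str.strip p = ""
    · simpa [h1] using ih s
    · by_cases h2a : PySem.Str.strip p = home
      · simpa [h1, h2a] using ih s
      · by_cases h2b : PySem.Chars.startswith (PySem.Chars.strip p.toList) (home.toList ++ ['/']) = true
        · simpa [h1, h2a, h2b] using ih s
        · by_cases hc : PySem.Str.strip p ∈ s
          · simpa [h1, h2a, h2b, hc, PySem.Set.add_of_mem hc] using ih s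
          · simpa [h1, h2a, h2b, hc, PySem.Set.add_of_not_mem hc] using
              ih (s ++ [PySem.Str.strip p])

-- A's second loop on a duplicated state is PySem.Set.add folded over the dirs.
theorem loopA2_eq (ds : List String) (s : PySem.Set String) :
    ds.foldl
      (fun (st : PySem.Set String × List String) d =>
        if PySem.Set.contains st.1 d then st
        else (PySem.Set.add st.1 d, st.2 ++ [d]))
      (s, s)
    = (ds.foldl PySem.Set.add s, ds.foldl PySem.Set.add s) := by
  induction ds generalizing s with
  | nil => simp
  | cons d ds ih =>
    by_cases hc : d ∈ s
    · simpa [hc, PySem.Set.add_of_mem hc] using ih s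
    · simpa [hc, PySem.Set.add_of_not_mem hc] using ih (s ++ [d])

-- ordered dedup commutes with filtering
theorem ofList_filter (p : String → Bool) (xs : List String) :
    PySem.Set.ofList (xs.filter p) = (PySem.Set.ofList xs).filter p := by
  induction xs with
  | nil => simp
  | cons x xs ih =>
    by_cases hp : p x = true
    · simp [hp, PySem.Set.ofList_cons, ih, PySem.Set.discard,
        List.filter_filter, Bool.and_comm]
    · simp [hp, PySem.Set.ofList_cons, ih, PySem.Set.discard,
        List.filter_filter]
      refine List.filter_congr (fun y _ => ?_)
      by_cases hyx : y = x
      · subst hyx; simp [hp]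
      · simp [hyx]

-- B's head-and-filter dedup computes set(xs)'s first-occurrence list
theorem pvNub_eq_ofList (l : List String) : pvNub l = PySem.Set.ofList l := by
  induction hn : l.length using Nat.strong_induction_on generalizing l with
  | _ n ih =>
    cases l with
    | nil => simp [pvNub]
    | cons x xs =>
      rw [pvNub, PySem.Set.ofList_cons,
        ih ((xs.filter (fun y => y ≠ x)).length)
          (by simpa [← hn] using Nat.lt_succ_of_le (List.length_filter_le _ _)) _ rfl,
        ofList_filter, PySem.Set.discard]
      exact congrArg (x :: ·) (List.filter_congr (fun y _ => by
        simp [decide_not, ← beq_eq_decide]))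

-- ===== VERDICT (by name: the statement is the Claim_ definition above) =====
theorem build_safe_path_spec : Claim_equal_build_safe_path := by
  intro raw_path home_dir _
  unfold Spec_build_safe_path build_safe_path build_safe_path_alt
  simp only [PySem.Set.empty, loopA_eq, loopA2_eq, pvNub_eq_ofList,
    PySem.Set.ofList_eq_foldl, List.foldl_append]
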